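-- pv_equiv track=rewrite | github.com/magua7/magualine-lite | app/storage.py | _screen_geo_prewarm_ips
-- ===== SOURCE A (Python) =====
-- def _screen_geo_prewarm_ips(rows: list[dict], limit: int = 80) -> set[str]:
--     stats: dict[str, dict[str, int]] = {}
--     selected: set[str] = set()
--     selected_order: list[str] = []
--
--     def add_selected(ip_value: str) -> None:
--         if ip_value and ip_value not in selected:
--             selected.add(ip_value)
--             selected_order.append(ip_value)
--
--     for index, row in enumerate(rows):
--         ip = str(row.get("screen_client_ip") or row.get("client_ip") or "").strip()
--         if not ip:
--             continue
--         severity = str(row.get("screen_severity") or row.get("severity") or "").strip().lower()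
--         action = str(row.get("screen_action") or row.get("action") or "").strip()
--         item = stats.setdefault(
--             ip,
--             {"count": 0, "critical": 0, "high": 0, "blocked": 0, "first_index": index},
--         )
--         item["count"] += 1
--         item["first_index"] = min(item["first_index"], index)
--         if severity == "critical":
--             item["critical"] += 1
--         if is_high_risk_severity(severity):
--             item["high"] += 1
--         if action == "blocked":
--             item["blocked"] += 1
--         if index < min(SCREEN_RAW_FLOW_LIMIT, limit):
--             add_selected(ip)
--
--     ranked = sorted(
--         stats.items(),
--         key=lambda item: (
--             int(item[1]["critical"]),
--             int(item[1]["high"]),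
--             int(item[1]["blocked"]),
--             int(item[1]["count"]),
--             -int(item[1]["first_index"]),
--         ),
--         reverse=True,
--     )
--     for ip, _stats in ranked[:max(16, limit // 4)]:
--         add_selected(ip)
--     return set(selected_order[:limit])
--
-- HIGH_RISK_SEVERITIES = ("critical", "high")
--
-- def is_high_risk_severity(value: str | None) -> bool:
--     return str(value or "").strip().lower() in HIGH_RISK_SEVERITIES
--
-- SCREEN_RAW_FLOW_LIMIT = 240
-- ===== SOURCE B (Python) =====
-- SCREEN_RAW_FLOW_LIMIT = 240
-- HIGH_RISK_SEVERITIES = ("critical", "high")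
--
--
-- def is_high_risk_severity(value):
--     return str(value or "").strip().lower() in HIGH_RISK_SEVERITIES
--
--
-- def _event(index, row):
--     ip = str(row.get("screen_client_ip") or row.get("client_ip") or "").strip()
--     sev = str(row.get("screen_severity") or row.get("severity") or "").strip().lower()
--     act = str(row.get("screen_action") or row.get("action") or "").strip()
--     return (index, ip, sev, act)
--
--
-- def _agg(events, ip):
--     sub = [e for e in events if e[1] == ip]
--     crit = [e for e in sub if e[2] == "critical"]
--     high = [e for e in sub if is_high_risk_severity(e[2])]
--     blocked = [e for e in sub if e[3] == "blocked"]
--     first = sub[0][0] if sub else 0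
--     return (len(sub), len(crit), len(high), len(blocked), first)
--
--
-- def _screen_geo_prewarm_ips(rows: list, limit: int = 80) -> set:
--     # declarative pipeline: event list, group-by via per-key scans, comprehensions
--     events = [ev for ev in (_event(i, r) for i, r in enumerate(rows)) if ev[1]]
--     ips = [e[1] for e in events]
--     keys = list(dict.fromkeys(ips))
--     stats = [(k, _agg(events, k)) for k in keys]
--     ranked = sorted(
--         stats,
--         key=lambda it: (it[1][1], it[1][2], it[1][3], it[1][0], -it[1][4]),
--         reverse=True,
--     )
--     cutoff = min(SCREEN_RAW_FLOW_LIMIT, limit)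
--     early = list(dict.fromkeys(e[1] for e in events if e[0] < cutoff))
--     extras = [k for k, _ in ranked[:max(16, limit // 4)] if k not in early]
--     order = early + extras
--     return set(order[:limit])
-- ===== Notes on version B (the rewrite author's own statement) =====
-- stated objective: alternative
-- what changed: A's single fused pass with a mutable per-ip stats dict and a shared add_selected closure is replaced by a declarative pipeline with no dict accumulator: materialise an event list, dedup keys with dict.fromkeys, compute each key's stats by independent per-key scans over the events, and build the selection by comprehensions and list concatenation.
import Mathlib
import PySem

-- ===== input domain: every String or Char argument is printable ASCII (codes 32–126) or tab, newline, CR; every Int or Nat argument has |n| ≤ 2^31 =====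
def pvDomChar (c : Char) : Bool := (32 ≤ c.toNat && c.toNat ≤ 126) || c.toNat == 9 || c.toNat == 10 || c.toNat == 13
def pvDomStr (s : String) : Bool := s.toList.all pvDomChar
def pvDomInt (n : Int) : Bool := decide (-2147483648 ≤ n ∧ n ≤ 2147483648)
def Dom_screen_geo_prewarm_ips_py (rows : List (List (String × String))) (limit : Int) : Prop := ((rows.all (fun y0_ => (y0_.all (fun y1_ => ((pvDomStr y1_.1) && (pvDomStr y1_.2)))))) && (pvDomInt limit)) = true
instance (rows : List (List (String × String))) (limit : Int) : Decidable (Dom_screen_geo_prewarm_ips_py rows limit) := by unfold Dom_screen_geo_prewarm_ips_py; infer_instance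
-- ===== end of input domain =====

-- B replaces A's fused pass (mutable per-ip stats dict + add_selected closure) by a
-- declarative pipeline: event list, dict.fromkeys dedup, per-key scans, comprehensions.
-- Objective: alternative structure (B's grouping is O(n·m) vs A's O(n); not faster).

-- shared row-field helpers (both Pythons compute these exact subexpressions)
def pvTruthy (o : Option String) : Option String :=
  match o with
  | some s => if s = "" then none else some s
  | none => none

def pvRowGet (row : List (String × String)) (k : String) : Option String :=
  (PySem.Dict.mk row).get? k

def pvRowField (row : List (String × String)) (k1 k2 : String) : String :=
  ((pvTruthy (pvRowGet row k1)).or (pvTruthy (pvRowGet row k2))).getD ""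

def pvRowIp (row : List (String × String)) : String :=
  PySem.Str.strip (pvRowField row "screen_client_ip" "client_ip")

def pvRowSev (row : List (String × String)) : String :=
  PySem.Str.lower (PySem.Str.strip (pvRowField row "screen_severity" "severity"))

def pvRowAct (row : List (String × String)) : String :=
  PySem.Str.strip (pvRowField row "screen_action" "action")

-- is_high_risk_severity (module helper, used by both Pythons)
def pvIsHigh (v : String) : Bool :=
  ["critical", "high"].contains (PySem.Str.lower (PySem.Str.strip (if v = "" then "" else v)))

-- lexicographic 5-tuple sort key (cr, hi, bl, c, -fi)
def pvKey5 (cr hi bl c nf : Int) : List Int := [cr, hi, bl, c, nf]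

-- ===== PORT A =====
def pvMk0 (i : Int) : PySem.Dict String Int :=
  PySem.Dict.mk [("count", 0), ("critical", 0), ("high", 0), ("blocked", 0), ("first_index", i)]

-- add_selected closure: state = (selected, selected_order)
def pvAddSel (st : PySem.Set String × List String) (ip : String) : PySem.Set String × List String :=
  if ip != "" && !PySem.Set.contains st.1 ip then (PySem.Set.add st.1 ip, st.2 ++ [ip]) else st

def pvStepA (limit : Int)
    (s : PySem.Dict String (PySem.Dict String Int) × (PySem.Set String × List String))
    (e : Int × List (String × String)) :
    PySem.Dict String (PySem.Dict String Int) × (PySem.Set String × List String) :=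
  let ip := pvRowIp e.2
  if ip = "" then s
  else
    let severity := pvRowSev e.2
    let action := pvRowAct e.2
    let stats1 := s.1.setdefault ip (pvMk0 e.1)
    let item := stats1.getD ip (pvMk0 e.1)
    let item := item.insert "count" (item.getD "count" 0 + 1)
    let item := item.insert "first_index" (min (item.getD "first_index" 0) e.1)
    let item := if severity = "critical" then item.insert "critical" (item.getD "critical" 0 + 1) else item
    let item := if pvIsHigh severity then item.insert "high" (item.getD "high" 0 + 1) else item
    let item := if action = "blocked" then item.insert "blocked" (item.getD "blocked" 0 + 1) else item
    (stats1.insert ip item, if e.1 < min 240 limit then pvAddSel s.2 ip else s.2)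

def pvKeyA (p : String × PySem.Dict String Int) : List Int :=
  pvKey5 (p.2.getD "critical" 0) (p.2.getD "high" 0) (p.2.getD "blocked" 0)
    (p.2.getD "count" 0) (-(p.2.getD "first_index" 0))

def screen_geo_prewarm_ips_py (rows : List (List (String × String))) (limit : Int) : List String :=
  let r := (PySem.List.enumerate rows 0).foldl (pvStepA limit) (PySem.Dict.empty, (PySem.Set.empty, []))
  let ranked := PySem.List.sorted r.1.items pvKeyA true
  let fin := (PySem.List.slice ranked none (some (max 16 (PySem.Int.floordiv limit 4)))).foldl
    (fun st p => pvAddSel st p.1) r.2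
  PySem.Set.ofList (PySem.List.slice fin.2 none (some limit))

-- ===== PORT B =====
-- _event(index, row)
def pvEvent (e : Int × List (String × String)) : Int × String × String × String :=
  (e.1, pvRowIp e.2, pvRowSev e.2, pvRowAct e.2)

-- _agg(events, ip): independent scans of the event list
def pvAggB (evs : List (Int × String × String × String)) (k : String) :
    Int × Int × Int × Int × Int :=
  let sub := evs.filter (fun e => e.2.1 == k)
  let crit := sub.filter (fun e => e.2.2.1 == "critical")
  let high := sub.filter (fun e => pvIsHigh e.2.2.1)
  let blocked := sub.filter (fun e => e.2.2.2 == "blocked")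
  let first : Int := match sub with | [] => 0 | e :: _ => e.1
  ((sub.length : Int), (crit.length : Int), (high.length : Int), (blocked.length : Int), first)

def pvKeyB (p : String × (Int × Int × Int × Int × Int)) : List Int :=
  pvKey5 p.2.2.1 p.2.2.2.1 p.2.2.2.2.1 p.2.1 (-(p.2.2.2.2.2))

def screen_geo_prewarm_ips_py_alt (rows : List (List (String × String))) (limit : Int) : List String :=
  let events := ((PySem.List.enumerate rows 0).map pvEvent).filter (fun ev => ev.2.1 != "")
  let ips := events.map (fun e => e.2.1)
  let keys := PySem.List.dedup ips
  let stats := keys.map (fun k => (k, pvAggB events k))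
  let ranked := PySem.List.sorted stats pvKeyB true
  let cutoff := min 240 limit
  let early := PySem.List.dedup ((events.filter (fun e => decide (e.1 < cutoff))).map (fun e => e.2.1))
  let extras := ((PySem.List.slice ranked none (some (max 16 (PySem.Int.floordiv limit 4)))).filter
      (fun p => !early.contains p.1)).map (fun p => p.1)
  let order := early ++ extras
  PySem.Set.ofList (PySem.List.slice order none (some limit))

-- ===== PRECONDITION & SPEC =====
def Spec_screen_geo_prewarm_ips_py (rows : List (List (String × String))) (limit : Int) (out : List String) : Prop := out = screen_geo_prewarm_ips_py_alt rows limit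
instance (rows : List (List (String × String))) (limit : Int) (out : List String) : Decidable (Spec_screen_geo_prewarm_ips_py rows limit out) := by unfold Spec_screen_geo_prewarm_ips_py; infer_instance

-- ===== CLAIM (what is proved, stated in full; the proofs are below) =====
def Claim_equal_screen_geo_prewarm_ips_py : Prop := ∀ (rows : List (List (String × String))) (limit : Int), Dom_screen_geo_prewarm_ips_py rows limit → Spec_screen_geo_prewarm_ips_py rows limit (screen_geo_prewarm_ips_py rows limit)

-- ===== LEMMAS AND PROOFS =====

-- a B tuple rendered as A's per-ip stats dict
def pvMk (t : Int × Int × Int × Int × Int) : PySem.Dict String Int :=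
  PySem.Dict.mk [("count", t.1), ("critical", t.2.1), ("high", t.2.2.1),
    ("blocked", t.2.2.2.1), ("first_index", t.2.2.2.2)]

def pvPhi (p : String × (Int × Int × Int × Int × Int)) : String × PySem.Dict String Int :=
  (p.1, pvMk p.2)

-- A's stats step, restated on an event
def pvStepE (d : PySem.Dict String (PySem.Dict String Int)) (e : Int × String × String × String) :
    PySem.Dict String (PySem.Dict String Int) :=
  let stats1 := d.setdefault e.2.1 (pvMk0 e.1)
  let item := stats1.getD e.2.1 (pvMk0 e.1)
  let item := item.insert "count" (item.getD "count" 0 + 1)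
  let item := item.insert "first_index" (min (item.getD "first_index" 0) e.1)
  let item := if e.2.2.1 = "critical" then item.insert "critical" (item.getD "critical" 0 + 1) else item
  let item := if pvIsHigh e.2.2.1 then item.insert "high" (item.getD "high" 0 + 1) else item
  let item := if e.2.2.2 = "blocked" then item.insert "blocked" (item.getD "blocked" 0 + 1) else item
  stats1.insert e.2.1 item

def pvStatA (d : PySem.Dict String (PySem.Dict String Int)) (e : Int × List (String × String)) :
    PySem.Dict String (PySem.Dict String Int) :=
  if pvRowIp e.2 = "" then d else pvStepE d (pvEvent e)

def pvSelE (limit : Int) (st : PySem.Set String × List String)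
    (e : Int × String × String × String) : PySem.Set String × List String :=
  if e.1 < min 240 limit then pvAddSel st e.2.1 else st

def pvSelA (limit : Int) (st : PySem.Set String × List String) (e : Int × List (String × String)) :
    PySem.Set String × List String :=
  if pvRowIp e.2 = "" then st else pvSelE limit st (pvEvent e)

def pvEvents (rows : List (List (String × String))) : List (Int × String × String × String) :=
  ((PySem.List.enumerate rows 0).map pvEvent).filter (fun ev => ev.2.1 != "")

-- A's fused loop step is a product of two independent accumulator updates
lemma pv_stepA_prod (limit : Int)
    (s : PySem.Dict String (PySem.Dict String Int) × (PySem.Set String × List String))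
    (e : Int × List (String × String)) :
    pvStepA limit s e = (pvStatA s.1 e, pvSelA limit s.2 e) := by
  cases s with
  | mk a b =>
    by_cases hip : pvRowIp e.2 = "" <;>
      simp [pvStepA, pvStatA, pvSelA, pvStepE, pvSelE, pvEvent, hip]

-- a guarded fold over a list is a fold over the filtered-and-mapped list
lemma pv_foldl_guard {α β σ : Type} (c : α → Bool) (t : α → β) (g : σ → α → σ) (g' : σ → β → σ)
    (h : ∀ s a, g s a = if c a then g' s (t a) else s) :
    ∀ (l : List α) (s : σ), l.foldl g s = ((l.filter c).map t).foldl g' s := by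
  intro l
  induction l with
  | nil => intro s; rfl
  | cons a l ih =>
    intro s
    rw [List.foldl_cons, h s a, List.filter_cons]
    by_cases hc : c a = true
    · simp only [hc, if_true, List.map_cons, List.foldl_cons]
      exact ih _
    · simp only [hc, Bool.false_eq_true, if_false]
      exact ih _

lemma pv_events_eq (rows : List (List (String × String))) :
    pvEvents rows
      = ((PySem.List.enumerate rows 0).filter (fun a => pvRowIp a.2 != "")).map pvEvent := by
  rw [pvEvents, List.filter_map]
  rfl

lemma pv_stat_fold (rows : List (List (String × String)))
    (d : PySem.Dict String (PySem.Dict String Int)) :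
    (PySem.List.enumerate rows 0).foldl pvStatA d = (pvEvents rows).foldl pvStepE d := by
  rw [pv_events_eq, pv_foldl_guard (fun a => pvRowIp a.2 != "") pvEvent pvStatA pvStepE]
  intro s a
  by_cases hip : pvRowIp a.2 = "" <;> simp [pvStatA, hip]

lemma pv_sel_fold (limit : Int) (rows : List (List (String × String)))
    (st : PySem.Set String × List String) :
    (PySem.List.enumerate rows 0).foldl (pvSelA limit) st
      = (pvEvents rows).foldl (pvSelE limit) st := by
  rw [pv_events_eq, pv_foldl_guard (fun a => pvRowIp a.2 != "") pvEvent (pvSelA limit) (pvSelE limit)]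
  intro s a
  by_cases hip : pvRowIp a.2 = "" <;> simp [pvSelA, hip]

lemma pv_setdefault_insert {κ ν : Type} [BEq κ] [LawfulBEq κ] (d : PySem.Dict κ ν) (k : κ) (v w : ν) :
    (d.setdefault k v).insert k w = d.insert k w := by
  by_cases h : d.contains k = true
  · rw [PySem.Dict.setdefault_of_contains _ _ h]
  · rw [PySem.Dict.setdefault_of_not_contains _ _ (by simpa using h), PySem.Dict.insert_insert_self]

-- the A-side in-place item update chain, computed on a translated tuple
lemma pv_item_chain (t : Int × Int × Int × Int × Int) (i : Int) (sev act : String)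
    (hf : t.2.2.2.2 ≤ i) :
    (let item := pvMk t
     let item := item.insert "count" (item.getD "count" 0 + 1)
     let item := item.insert "first_index" (min (item.getD "first_index" 0) i)
     let item := if sev = "critical" then item.insert "critical" (item.getD "critical" 0 + 1) else item
     let item := if pvIsHigh sev then item.insert "high" (item.getD "high" 0 + 1) else item
     if act = "blocked" then item.insert "blocked" (item.getD "blocked" 0 + 1) else item)
    = pvMk (t.1 + 1,
        t.2.1 + (if sev = "critical" then 1 else 0),
        t.2.2.1 + (if pvIsHigh sev then 1 else 0),
        t.2.2.2.1 + (if act = "blocked" then 1 else 0),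
        t.2.2.2.2) := by
  have h2 : min (((pvMk t).insert "count" ((pvMk t).getD "count" 0 + 1)).getD "first_index" 0) i
      = t.2.2.2.2 := by
    have h1 : ((pvMk t).insert "count" ((pvMk t).getD "count" 0 + 1)).getD "first_index" 0
        = t.2.2.2.2 := rfl
    rw [h1]; exact min_eq_left hf
  simp only [h2]
  split_ifs <;> first | rfl | (simp only [add_zero]; rfl)

-- filtering the events for a key
lemma pvAgg_append (l : List (Int × String × String × String)) (e : Int × String × String × String)
    (k : String) :
    (l ++ [e]).filter (fun x => x.2.1 == k)
      = l.filter (fun x => x.2.1 == k) ++ (if e.2.1 = k then [e] else []) := by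
  rw [List.filter_append]
  by_cases h : e.2.1 = k <;> simp [h]

lemma pv_mem_map_key_iff (l : List (Int × String × String × String)) (k : String) :
    k ∈ l.map (fun e => e.2.1) ↔ l.filter (fun x => x.2.1 == k) ≠ [] := by
  simp only [ne_eq, List.filter_eq_nil_iff, beq_iff_eq, List.mem_map, not_forall]
  constructor
  · rintro ⟨e, he, rfl⟩
    exact ⟨e, he, by simp⟩
  · rintro ⟨e, he, hk⟩
    exact ⟨e, he, by simpa using hk⟩

-- first index of the key's events is below any later index
lemma pvAgg_fi_le (l : List (Int × String × String × String))
    (i : Int) (h : ∀ a ∈ l, a.1 < i) (k : String)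
    (hm : k ∈ l.map (fun e => e.2.1)) :
    (pvAggB l k).2.2.2.2 ≤ i := by
  simp only [pvAggB]
  cases hs : l.filter (fun x => x.2.1 == k) with
  | nil => exact absurd hs ((pv_mem_map_key_iff l k).mp hm)
  | cons a tl =>
    have ha : a ∈ l.filter (fun x => x.2.1 == k) := by rw [hs]; exact List.mem_cons_self
    exact le_of_lt (h a (List.mem_of_mem_filter ha))

-- B's aggregate after one more event of the same key
lemma pv_len_filter_snoc {β : Type} (p : β → Bool) (L : List β) (e : β) :
    (((L ++ [e]).filter p).length : Int)
      = ((L.filter p).length : Int) + (if p e = true then 1 else 0) := by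
  rw [List.filter_append, List.length_append]
  by_cases h : p e = true <;> simp [h]

lemma pvAggB_append_self (l : List (Int × String × String × String))
    (e : Int × String × String × String) :
    pvAggB (l ++ [e]) e.2.1
      = (let t := if e.2.1 ∈ l.map (fun x => x.2.1) then pvAggB l e.2.1 else (0, 0, 0, 0, e.1)
         (t.1 + 1,
          t.2.1 + (if e.2.2.1 = "critical" then 1 else 0),
          t.2.2.1 + (if pvIsHigh e.2.2.1 then 1 else 0),
          t.2.2.2.1 + (if e.2.2.2 = "blocked" then 1 else 0),
          t.2.2.2.2)) := by
  have hsub := pvAgg_append l e e.2.1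
  rw [if_pos rfl] at hsub
  by_cases hm : e.2.1 ∈ l.map (fun x => x.2.1)
  · simp only [pvAggB, hsub, if_pos hm, Prod.mk.injEq]
    refine ⟨?_, ?_, ?_, ?_, ?_⟩
    · simp only [List.length_append, List.length_singleton]; push_cast; omega
    · rw [pv_len_filter_snoc]; simp [beq_iff_eq]
    · rw [pv_len_filter_snoc]
    · rw [pv_len_filter_snoc]; simp [beq_iff_eq]
    · cases hs : l.filter (fun x => x.2.1 == e.2.1) with
      | nil => exact absurd hs ((pv_mem_map_key_iff l e.2.1).mp hm)
      | cons a tl => rfl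
  · have hnil : l.filter (fun x => x.2.1 == e.2.1) = [] := by
      by_contra h
      exact hm ((pv_mem_map_key_iff l e.2.1).mpr h)
    simp only [pvAggB, hsub, hnil, if_neg hm, List.nil_append, Prod.mk.injEq]
    have h0 : ([e] : List (Int × String × String × String)) = [] ++ [e] := rfl
    refine ⟨by simp, ?_, ?_, ?_, trivial⟩
    · rw [h0, pv_len_filter_snoc]; simp [beq_iff_eq]
    · rw [h0, pv_len_filter_snoc]; simp
    · rw [h0, pv_len_filter_snoc]; simp [beq_iff_eq]

-- B's aggregate ignores events of other keys
lemma pvAggB_append_other (l : List (Int × String × String × String))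
    (e : Int × String × String × String) (k : String) (hk : e.2.1 ≠ k) :
    pvAggB (l ++ [e]) k = pvAggB l k := by
  simp only [pvAggB, pvAgg_append l e k, if_neg hk, List.append_nil]

-- the master lemma: lookup in A's stats fold is B's per-key aggregate
lemma pv_get_fold (evs : List (Int × String × String × String)) :
    evs.Pairwise (fun a b => a.1 < b.1) → ∀ (k : String),
    (evs.foldl pvStepE PySem.Dict.empty).get? k
      = if k ∈ evs.map (fun e => e.2.1) then some (pvMk (pvAggB evs k)) else none := by
  induction evs using List.reverseRecOn with
  | nil => intro _ k; simp [PySem.Dict.get?_empty]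
  | append_singleton l e ih =>
    intro hpw k
    rw [List.pairwise_append] at hpw
    obtain ⟨hl, -, hcross⟩ := hpw
    have hlt : ∀ a ∈ l, a.1 < e.1 := fun a ha => hcross a ha e (List.mem_singleton_self e)
    have IH := ih hl
    rw [List.foldl_append, List.foldl_cons, List.foldl_nil]
    -- the updated item is pvMk of the updated tuple
    have hgetD : ((l.foldl pvStepE PySem.Dict.empty).setdefault e.2.1 (pvMk0 e.1)).getD e.2.1 (pvMk0 e.1)
        = pvMk (if e.2.1 ∈ l.map (fun x => x.2.1) then pvAggB l e.2.1 else (0, 0, 0, 0, e.1)) := by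
      rw [PySem.Dict.getD_setdefault_self, PySem.Dict.getD_eq_get?_getD, IH e.2.1]
      by_cases hm : e.2.1 ∈ l.map (fun x => x.2.1) <;> simp [hm] <;> rfl
    have hfi : (if e.2.1 ∈ l.map (fun x => x.2.1) then pvAggB l e.2.1
        else ((0 : Int), (0 : Int), (0 : Int), (0 : Int), e.1)).2.2.2.2 ≤ e.1 := by
      by_cases hm : e.2.1 ∈ l.map (fun x => x.2.1)
      · rw [if_pos hm]; exact pvAgg_fi_le l e.1 hlt e.2.1 hm
      · rw [if_neg hm]
    have hstep : pvStepE (l.foldl pvStepE PySem.Dict.empty) e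
        = (l.foldl pvStepE PySem.Dict.empty).insert e.2.1 (pvMk (pvAggB (l ++ [e]) e.2.1)) := by
      simp only [pvStepE]
      rw [hgetD, pv_item_chain _ e.1 e.2.2.1 e.2.2.2 hfi, pv_setdefault_insert,
        pvAggB_append_self l e]
    rw [hstep]
    by_cases hk : k = e.2.1
    · subst hk
      rw [PySem.Dict.get?_insert_self]
      simp
    · rw [PySem.Dict.get?_insert_of_ne _ _ hk, IH k,
        pvAggB_append_other l e k (fun h => hk h.symm)]
      have : (k ∈ (l ++ [e]).map fun e => e.2.1) ↔ (k ∈ l.map fun e => e.2.1) := by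
        simp [hk]
      simp only [this]

lemma pv_insertBy_map {α β κ : Type} (f : α → β) (key : β → κ) (g : κ → κ → Bool) (x : α) :
    ∀ l : List α, PySem.List.insertBy (fun a b => g (key a) (key b)) (f x) (l.map f)
      = (PySem.List.insertBy (fun a b => g (key (f a)) (key (f b))) x l).map f := by
  intro l
  induction l with
  | nil => rfl
  | cons y ys ih =>
    simp only [List.map_cons, PySem.List.insertBy]
    by_cases hc : g (key (f x)) (key (f y)) <;> simp [hc, ih]

-- sorting a mapped list by a key is mapping the sort by the composed key
lemma pv_sorted_map {α β κ : Type} [LT κ] [DecidableLT κ] (f : α → β) (key : β → κ)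
    (l : List α) (rev : Bool) :
    PySem.List.sorted (l.map f) key rev = (PySem.List.sorted l (fun x => key (f x)) rev).map f := by
  have hgen : ∀ (g : κ → κ → Bool) (acc : List α),
      (l.map f).foldl (fun acc x => PySem.List.insertBy (fun a b => g (key a) (key b)) x acc) (acc.map f)
      = (l.foldl (fun acc x => PySem.List.insertBy (fun a b => g (key (f a)) (key (f b))) x acc) acc).map f := by
    intro g acc
    induction l generalizing acc with
    | nil => rfl
    | cons y ys ih =>
      simp only [List.map_cons, List.foldl_cons]
      rw [pv_insertBy_map f key g y acc]
      exact ih _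
  simp only [PySem.List.sorted]
  cases rev
  · exact hgen (fun u v => decide (u < v)) []
  · exact hgen (fun u v => decide (v < u)) []

lemma pv_keyA_phi (p : String × (Int × Int × Int × Int × Int)) : pvKeyA (pvPhi p) = pvKeyB p := rfl

-- the add_selected fold keeps selected = selected_order exactly
def pvAdd1 (s : PySem.Set String) (x : String) : PySem.Set String :=
  if x = "" then s else PySem.Set.add s x

lemma pv_addSel_diag (xs : List String) :
    ∀ S : PySem.Set String, xs.foldl pvAddSel (S, S) = (xs.foldl pvAdd1 S, xs.foldl pvAdd1 S) := by
  induction xs with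
  | nil => intro S; rfl
  | cons x xs ih =>
    intro S
    rw [List.foldl_cons, List.foldl_cons]
    have hstep : pvAddSel (S, S) x = (pvAdd1 S x, pvAdd1 S x) := by
      by_cases hx : x = ""
      · simp [pvAddSel, pvAdd1, hx]
      · by_cases hm : x ∈ S
        · simp only [pvAddSel, pvAdd1, if_neg hx, PySem.Set.add_of_mem hm]
          simp [hm]
        · simp only [pvAddSel, pvAdd1, if_neg hx, PySem.Set.add_of_not_mem hm]
          simp [hx, hm]
    rw [hstep]
    exact ih _

-- on nonempty strings pvAdd1 is Set.add
lemma pv_add1_fold_eq (xs : List String) (h : ∀ x ∈ xs, x ≠ "") (S : PySem.Set String) :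
    xs.foldl pvAdd1 S = xs.foldl PySem.Set.add S := by
  induction xs generalizing S with
  | nil => rfl
  | cons x xs ih =>
    rw [List.foldl_cons, List.foldl_cons]
    rw [show pvAdd1 S x = PySem.Set.add S x from by simp [pvAdd1, h x List.mem_cons_self]]
    exact ih (fun y hy => h y (List.mem_cons_of_mem _ hy)) _

-- A's stats step in insert-normal form (for the keys lemma)
def pvChainF (d : PySem.Dict String (PySem.Dict String Int)) (e : Int × String × String × String) :
    PySem.Dict String Int :=
  let item := d.getD e.2.1 (pvMk0 e.1)
  let item := item.insert "count" (item.getD "count" 0 + 1)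
  let item := item.insert "first_index" (min (item.getD "first_index" 0) e.1)
  let item := if e.2.2.1 = "critical" then item.insert "critical" (item.getD "critical" 0 + 1) else item
  let item := if pvIsHigh e.2.2.1 then item.insert "high" (item.getD "high" 0 + 1) else item
  if e.2.2.2 = "blocked" then item.insert "blocked" (item.getD "blocked" 0 + 1) else item

lemma pvStepE_insert (d : PySem.Dict String (PySem.Dict String Int))
    (e : Int × String × String × String) :
    pvStepE d e = d.insert e.2.1 (pvChainF d e) := by
  simp only [pvStepE, pvChainF, PySem.Dict.getD_setdefault_self, pv_setdefault_insert]

lemma pv_evs_pairwise (rows : List (List (String × String))) :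
    (pvEvents rows).Pairwise (fun a b => a.1 < b.1) := by
  rw [pv_events_eq]
  rw [List.pairwise_map]
  exact (PySem.List.pairwise_lt_enumerate rows 0).filter _

lemma pv_evs_key_ne (rows : List (List (String × String))) :
    ∀ x ∈ pvEvents rows, x.2.1 ≠ "" := by
  intro x hx
  have := List.of_mem_filter hx
  simpa using this

-- A's stats dict, rendered: items = B's stats list through pvPhi
lemma pv_items_fold (rows : List (List (String × String))) :
    ((pvEvents rows).foldl pvStepE PySem.Dict.empty).items
      = ((PySem.List.dedup ((pvEvents rows).map (fun e => e.2.1))).map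
          (fun k => (k, pvAggB (pvEvents rows) k))).map pvPhi := by
  have hstep : pvStepE = fun d (e : Int × String × String × String) =>
      d.insert e.2.1 (pvChainF d e) := funext fun d => funext fun e => pvStepE_insert d e
  have hkeys : ((pvEvents rows).foldl pvStepE PySem.Dict.empty).keys
      = PySem.Set.ofList ((pvEvents rows).map (fun e => e.2.1)) := by
    rw [hstep, PySem.Dict.keys_foldl_insert_key]
    rw [PySem.Dict.keys_empty, PySem.Set.update_nil_left]
  have hnd : ((pvEvents rows).foldl pvStepE PySem.Dict.empty).keys.Nodup := by
    rw [hkeys]; exact PySem.Set.nodup_ofList _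
  rw [PySem.Dict.items_eq_map_keys _ hnd (pvMk0 0), hkeys, PySem.List.dedup_eq_ofList,
    List.map_map]
  apply List.map_congr_left
  intro k hk
  have hkmem : k ∈ (pvEvents rows).map (fun e => e.2.1) := (PySem.Set.mem_ofList _ _).mp hk
  have hget := pv_get_fold (pvEvents rows) (pv_evs_pairwise rows) k
  rw [if_pos hkmem] at hget
  simp [pvPhi, Function.comp, PySem.Dict.getD_eq_get?_getD, hget]

-- ===== VERDICT (by name: the statement is the Claim_ definition above) =====
theorem screen_geo_prewarm_ips_py_spec : Claim_equal_screen_geo_prewarm_ips_py := by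
  intro rows limit _
  show screen_geo_prewarm_ips_py rows limit = screen_geo_prewarm_ips_py_alt rows limit
  simp only [screen_geo_prewarm_ips_py, screen_geo_prewarm_ips_py_alt]
  -- fuse → product of the stats fold and the selection fold
  rw [PySem.List.foldl_congr_mem (PySem.List.enumerate rows 0) (pvStepA limit)
      (fun s e => (pvStatA s.1 e, pvSelA limit s.2 e)) _ (fun acc x _ => pv_stepA_prod limit acc x),
    PySem.List.foldl_prod_mk, pv_stat_fold, pv_sel_fold]
  -- B's events are pvEvents rows
  have hEv : ((PySem.List.enumerate rows 0).map pvEvent).filter (fun ev => ev.2.1 != "")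
      = pvEvents rows := rfl
  rw [hEv]
  -- name the shared pieces
  set evs := pvEvents rows with hevs
  set ips := evs.map (fun e => e.2.1) with hips
  set statsB := (PySem.List.dedup ips).map (fun k => (k, pvAggB evs k)) with hstats
  set rankedB := PySem.List.sorted statsB pvKeyB true with hranked
  set K : Int := max 16 (PySem.Int.floordiv limit 4) with hK
  set earlyIps := (evs.filter (fun e => decide (e.1 < min 240 limit))).map (fun e => e.2.1)
    with hearly
  have htop : (0 : Int) ≤ K := le_trans (by norm_num) (le_max_left _ _)
  -- A's ranked list is B's, mapped through pvPhi
  have hrk : PySem.List.sorted ((evs.foldl pvStepE PySem.Dict.empty).items) pvKeyA true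
      = rankedB.map pvPhi := by
    rw [pv_items_fold rows, ← hevs, ← hips, ← hstats, pv_sorted_map pvPhi pvKeyA statsB true]
    rw [show (fun x => pvKeyA (pvPhi x)) = pvKeyB from funext pv_keyA_phi, ← hranked]
  rw [hrk]
  -- the early-flow selection fold is a fold of add_selected over earlyIps
  have hsel : evs.foldl (pvSelE limit) (PySem.Set.empty, [])
      = earlyIps.foldl pvAddSel (PySem.Set.empty, []) := by
    rw [hearly, ← pv_foldl_guard (fun e => decide (e.1 < min 240 limit)) (fun e => e.2.1)
      (pvSelE limit) pvAddSel ?_ evs (PySem.Set.empty, [])]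
    intro s a
    simp [pvSelE]
  rw [hsel]
  have hne_early : ∀ x ∈ earlyIps, x ≠ "" := by
    intro x hx
    rw [hearly] at hx
    obtain ⟨e, he, rfl⟩ := List.mem_map.mp hx
    exact pv_evs_key_ne rows e (List.mem_of_mem_filter he)
  -- early selection state: selected = selected_order = set(earlyIps)
  have hdiag1 : earlyIps.foldl pvAddSel (PySem.Set.empty, [])
      = (PySem.Set.ofList earlyIps, PySem.Set.ofList earlyIps) := by
    rw [show (PySem.Set.empty (α := String), ([] : List String))
        = (([] : PySem.Set String), ([] : List String)) from rfl,
      pv_addSel_diag earlyIps [], pv_add1_fold_eq earlyIps hne_early,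
      ← PySem.Set.ofList_eq_foldl]
  rw [hdiag1]
  -- slices → takes (both sides)
  simp only [PySem.List.slice_to _ htop]
  -- nonempty keys in the ranked prefix
  have hne_tk : ∀ x ∈ (rankedB.take K.toNat).map (fun p => p.1), x ≠ "" := by
    intro x hx
    obtain ⟨q, hq, rfl⟩ := List.mem_map.mp hx
    have hq2 : q ∈ statsB := (PySem.List.mem_sorted _ _ _ _).mp (List.mem_of_mem_take hq)
    obtain ⟨k, hk, rfl⟩ := List.mem_map.mp hq2
    have : k ∈ ips := (PySem.List.mem_dedup _ _).mp hk
    obtain ⟨e, he, rfl⟩ := List.mem_map.mp this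
    exact pv_evs_key_ne rows e he
  -- the ranked prefix keys are distinct
  have hnd_tk : ((rankedB.take K.toNat).map (fun p => p.1)).Nodup := by
    have hperm : (rankedB.map (fun p => p.1)).Perm (statsB.map (fun p => p.1)) :=
      (PySem.List.sorted_perm statsB pvKeyB true).map _
    have hkeysB : statsB.map (fun p => p.1) = PySem.List.dedup ips := by
      rw [hstats, List.map_map]
      exact List.map_id _
    have hndB : (statsB.map (fun p => p.1)).Nodup := by
      rw [hkeysB, PySem.List.dedup_eq_ofList]
      exact PySem.Set.nodup_ofList _
    have hndR : (rankedB.map (fun p => p.1)).Nodup := hperm.symm.nodup hndB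
    rw [List.map_take]
    exact (List.take_sublist _ _).nodup hndR
  -- phase 3: the top-up fold appends the new ranked keys
  have hstep2 : ∀ init : PySem.Set String × List String,
      List.foldl (fun st (p : String × PySem.Dict String Int) => pvAddSel st p.1) init
        ((rankedB.map pvPhi).take K.toNat)
      = List.foldl pvAddSel init ((rankedB.take K.toNat).map (fun p => p.1)) := by
    intro init
    rw [← List.map_take, List.foldl_map, List.foldl_map]
    rfl
  rw [hstep2]
  have hfin : (((rankedB.take K.toNat).map (fun p => p.1)).foldl pvAddSel
      (PySem.Set.ofList earlyIps, PySem.Set.ofList earlyIps)).2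
      = PySem.List.dedup earlyIps
        ++ ((rankedB.take K.toNat).filter
            (fun p => !(PySem.List.dedup earlyIps).contains p.1)).map (fun p => p.1) := by
    rw [pv_addSel_diag, pv_add1_fold_eq _ hne_tk]
    show ((rankedB.take K.toNat).map (fun p => p.1)).foldl PySem.Set.add
        (PySem.Set.ofList earlyIps) = _
    rw [show ((rankedB.take K.toNat).map (fun p => p.1)).foldl PySem.Set.add
          (PySem.Set.ofList earlyIps)
        = PySem.Set.update (PySem.Set.ofList earlyIps)
            ((rankedB.take K.toNat).map (fun p => p.1)) from rfl,
      PySem.Set.update_eq_append_filter,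
      PySem.Set.ofList_eq_self_of_nodup _ hnd_tk,
      PySem.List.dedup_eq_ofList earlyIps, List.filter_map]
    congr 1
  rw [hfin]
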